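-- pv_equiv track=rewrite | github.com/aladdinpersson/Courses | Others/advent_of_code/day2/day2.py | part1
-- ===== SOURCE A (Python) =====
-- def part1(data):
--     sum2, sum3 = 0, 0
--
--     for line in data:
--         D = {}
--
--         for letter in line:
--             D[letter] = D[letter] + 1 if letter in D else 1
--
--         sum2 += 1 if 2 in D.values() else 0
--         sum3 += 1 if 3 in D.values() else 0
--
--     return sum2,sum3
-- ===== SOURCE B (Python) =====
-- def run_lengths(s):
--     # lengths of maximal runs of equal adjacent elements
--     if not s:
--         return []
--     c = s[0]
--     rest = s[1:]
--     k = 1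
--     while rest and rest[0] == c:
--         k += 1
--         rest = rest[1:]
--     return [k] + run_lengths(rest)
--
--
-- def part1(data):
--     sum2, sum3 = 0, 0
--     for line in data:
--         runs = run_lengths(sorted(line))
--         sum2 += 1 if 2 in runs else 0
--         sum3 += 1 if 3 in runs else 0
--     return sum2, sum3
-- ===== Notes on version B (the rewrite author's own statement) =====
-- stated objective: alternative
-- what changed: Replaces the per-line hash-map frequency count and values() membership test by sorting each line and scanning it once into maximal-run lengths (a recursive run-length encoding), then testing whether 2 or 3 occurs among the run lengths.
import Mathlib
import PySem

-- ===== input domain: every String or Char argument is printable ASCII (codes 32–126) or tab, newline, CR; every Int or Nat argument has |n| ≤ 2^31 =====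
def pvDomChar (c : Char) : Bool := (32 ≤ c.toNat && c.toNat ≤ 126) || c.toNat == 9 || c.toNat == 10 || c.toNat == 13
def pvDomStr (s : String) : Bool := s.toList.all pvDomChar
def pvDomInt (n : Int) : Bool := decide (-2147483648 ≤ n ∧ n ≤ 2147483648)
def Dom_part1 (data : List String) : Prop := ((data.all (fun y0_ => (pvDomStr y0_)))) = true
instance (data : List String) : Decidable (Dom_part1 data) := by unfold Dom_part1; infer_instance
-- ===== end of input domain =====

-- B sorts each line and run-length-encodes it, testing whether 2 / 3 is a run length: a sort-and-scan alternative to A's frequency dict.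

-- ===== PORT A =====
def part1 (data : List String) : Int × Int :=
  data.foldl (fun (s : Int × Int) line =>
    let D := line.toList.foldl
      (fun (d : PySem.Dict Char Int) c =>
        d.insert c (if d.contains c then d.getD c 0 + 1 else 1)) PySem.Dict.empty
    (s.1 + (if D.values.contains (2 : Int) then 1 else 0),
     s.2 + (if D.values.contains (3 : Int) then 1 else 0))) (0, 0)

-- ===== PORT B =====
-- run_lengths: head run via the while loop (= takeWhile/dropWhile split), then recurse on the remainder
def runLengths : List Char → List Nat
  | [] => []
  | c :: rest =>
    (1 + (rest.takeWhile (fun x => x == c)).length) ::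
      runLengths (rest.dropWhile (fun x => x == c))
termination_by s => s.length
decreasing_by
  simp only [List.length_cons]
  exact Nat.lt_succ_of_le (List.length_dropWhile_le _ _)

def part1_alt (data : List String) : Int × Int :=
  data.foldl (fun (s : Int × Int) line =>
    let runs := runLengths (PySem.List.sorted line.toList (fun x => x) false)
    (s.1 + (if runs.contains 2 then 1 else 0),
     s.2 + (if runs.contains 3 then 1 else 0))) (0, 0)

-- ===== PRECONDITION & SPEC =====
def Spec_part1 (data : List String) (out : Int × Int) : Prop := out = part1_alt data
instance (data : List String) (out : Int × Int) : Decidable (Spec_part1 data out) := by unfold Spec_part1; infer_instance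

-- ===== CLAIM (what is proved, stated in full; the proofs are below) =====
def Claim_equal_part1 : Prop := ∀ (data : List String), Dom_part1 data → Spec_part1 data (part1 data)

-- ===== LEMMAS AND PROOFS =====

-- A's dict-building loop builds exactly Counter(line).
theorem part1_dict_eq_counter (l : List Char) :
    l.foldl (fun (d : PySem.Dict Char Int) c =>
      d.insert c (if d.contains c then d.getD c 0 + 1 else 1)) PySem.Dict.empty
    = PySem.Dict.counter l := by
  rw [← PySem.Dict.foldl_insert_getD_add_one_eq_counter]
  congr 1
  funext d c
  by_cases h : d.contains c = true
  · simp [h]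
  · have hf : d.contains c = false := eq_false_of_ne_true h
    simp [hf, PySem.Dict.getD_of_not_contains d 0 hf]

-- 'n in Counter(l).values()' is 'some element of l has count n'.
theorem part1_values_contains (l : List Char) (n : Nat) :
    (PySem.Dict.counter l).values.contains ((n : Int)) = true ↔ ∃ c ∈ l, l.count c = n := by
  have hv : (PySem.Dict.counter l).values
      = (PySem.Set.ofList l).map (fun k => ((l.count k : Int))) := by
    show ((PySem.Dict.counter l).items.map (·.2))
      = (PySem.Set.ofList l).map (fun k => ((l.count k : Int)))
    rw [PySem.Dict.items_counter]
    simp [List.map_map, Function.comp]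
  rw [hv]
  simp only [List.contains_iff_mem, List.mem_map, PySem.Set.mem_ofList]
  constructor
  · rintro ⟨c, hc, hcv⟩; exact ⟨c, hc, by exact_mod_cast hcv⟩
  · rintro ⟨c, hc, hcv⟩; exact ⟨c, hc, by exact_mod_cast hcv⟩

-- In a nondecreasing list whose elements all dominate c, c never survives dropWhile (== c).
theorem not_mem_dropWhile_of_le (c : Char) (rest : List Char)
    (hp : rest.Pairwise (· ≤ ·)) (hge : ∀ x ∈ rest, c ≤ x) :
    c ∉ rest.dropWhile (fun x => x == c) := by
  induction rest with
  | nil => simp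
  | cons x t ih =>
    by_cases hx : x = c
    · subst hx
      rw [List.dropWhile_cons, if_pos (by simp)]
      exact ih (List.Pairwise.sublist (List.sublist_cons_self _ _) hp)
        (fun y hy => hge y (List.mem_cons_of_mem _ hy))
    · rw [List.dropWhile_cons, if_neg (by simp [hx])]
      have hcx : c < x := lt_of_le_of_ne (hge x List.mem_cons_self) (fun h => hx h.symm)
      intro hmem
      rcases List.mem_cons.mp hmem with h | h
      · exact hx h.symm
      · have : x ≤ c := (List.pairwise_cons.mp hp).1 c h
        exact absurd (lt_of_lt_of_le hcx this) (lt_irrefl c)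

-- For a sorted list, n appears among the run lengths iff some element has count n.
theorem mem_runLengths_iff (s : List Char) (hs : s.Pairwise (· ≤ ·)) (n : Nat) :
    n ∈ runLengths s ↔ ∃ c ∈ s, s.count c = n := by
  induction s using runLengths.induct with
  | case1 => simp [runLengths]
  | case2 c rest ih =>
    have hge : ∀ x ∈ rest, c ≤ x := (List.pairwise_cons.mp hs).1
    have hrest : rest.Pairwise (· ≤ ·) := (List.pairwise_cons.mp hs).2
    have hdr : (rest.dropWhile (fun x => x == c)).Pairwise (· ≤ ·) :=
      List.Pairwise.sublist (List.dropWhile_sublist _) hrest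
    have hcnot : c ∉ rest.dropWhile (fun x => x == c) :=
      not_mem_dropWhile_of_le c rest hrest hge
    have htw : ∀ x ∈ rest.takeWhile (fun x => x == c), x = c := by
      intro x hx
      have hpx := List.mem_takeWhile_imp hx
      exact beq_iff_eq.mp hpx
    have hsplit : rest.takeWhile (fun x => x == c) ++ rest.dropWhile (fun x => x == c) = rest :=
      List.takeWhile_append_dropWhile
    -- count of c in the whole list = 1 + head-run length
    have hcountc : (c :: rest).count c = 1 + (rest.takeWhile (fun x => x == c)).length := by
      rw [List.count_cons_self]
      have hc : rest.count c
          = (rest.takeWhile (fun x => x == c)).count c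
            + (rest.dropWhile (fun x => x == c)).count c := by
        conv_lhs => rw [← hsplit]
        exact List.count_append ..
      have h1 : (rest.takeWhile (fun x => x == c)).count c
          = (rest.takeWhile (fun x => x == c)).length :=
        List.count_eq_length.mpr (fun x hx => (htw x hx).symm)
      have h2 : (rest.dropWhile (fun x => x == c)).count c = 0 :=
        List.count_eq_zero.mpr hcnot
      omega
    -- count of an element of the tail part = its count in the tail part
    have hcountdr : ∀ x ∈ rest.dropWhile (fun x => x == c),
        (c :: rest).count x = (rest.dropWhile (fun x => x == c)).count x := by
      intro x hx
      have hxc : x ≠ c := fun h => hcnot (h ▸ hx)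
      rw [List.count_cons_of_ne (Ne.symm hxc)]
      have hc : rest.count x
          = (rest.takeWhile (fun x => x == c)).count x
            + (rest.dropWhile (fun x => x == c)).count x := by
        conv_lhs => rw [← hsplit]
        exact List.count_append ..
      have : (rest.takeWhile (fun x => x == c)).count x = 0 :=
        List.count_eq_zero.mpr (fun hmem => hxc (htw x hmem))
      omega
    rw [runLengths]
    constructor
    · intro h
      rcases List.mem_cons.mp h with h | h
      · exact ⟨c, List.mem_cons_self, by omega⟩
      · rcases (ih hdr).mp h with ⟨x, hx, hcnt⟩
        refine ⟨x, List.mem_cons_of_mem _ ((List.dropWhile_sublist _).subset hx), ?_⟩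
        rw [hcountdr x hx]; exact hcnt
    · rintro ⟨x, hx, hcnt⟩
      by_cases hxc : x = c
      · subst hxc
        exact List.mem_cons.mpr (Or.inl (by omega))
      · have hxrest : x ∈ rest := by
          rcases List.mem_cons.mp hx with h | h
          · exact absurd h hxc
          · exact h
        have hxdr : x ∈ rest.dropWhile (fun x => x == c) := by
          rw [← hsplit] at hxrest
          rcases List.mem_append.mp hxrest with h | h
          · exact absurd (htw x h) hxc
          · exact h
        exact List.mem_cons.mpr (Or.inr ((ih hdr).mpr
          ⟨x, hxdr, by rw [← hcountdr x hxdr]; exact hcnt⟩))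

-- Per line: A's membership test equals B's run-length membership test.
theorem part1_line_eq (l : List Char) (n : Nat) :
    (PySem.Dict.counter l).values.contains ((n : Int))
      = (runLengths (PySem.List.sorted l (fun x => x) false)).contains n := by
  set s := PySem.List.sorted l (fun x => x) false with hsdef
  have hperm : s.Perm l := PySem.List.sorted_perm l (fun x => x) false
  have hpw : s.Pairwise (· ≤ ·) := PySem.List.sorted_pairwise l (fun x => x)
  rw [Bool.eq_iff_iff, part1_values_contains, List.contains_iff_mem, mem_runLengths_iff s hpw]
  constructor
  · rintro ⟨c, hc, hcnt⟩
    exact ⟨c, hperm.mem_iff.mpr hc, by rw [hperm.count_eq]; exact hcnt⟩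
  · rintro ⟨c, hc, hcnt⟩
    exact ⟨c, hperm.mem_iff.mp hc, by rw [← hperm.count_eq]; exact hcnt⟩

-- ===== VERDICT (by name: the statement is the Claim_ definition above) =====
theorem part1_spec : Claim_equal_part1 := by
  intro data _
  show part1 data = part1_alt data
  unfold part1 part1_alt
  congr 1
  funext s line
  simp only [part1_dict_eq_counter]
  rw [show ((2 : Int)) = ((2 : Nat) : Int) from rfl, show ((3 : Int)) = ((3 : Nat) : Int) from rfl,
    part1_line_eq, part1_line_eq]
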